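-- pv_equiv track=rewrite | github.com/LOSTINMAY/PADA-coder | data_collect/programming/utils.py | get_function
-- ===== SOURCE A (Python) =====
-- def get_function(prompt):
--     lines = prompt.split('\n')
--     funcs = []
--
--     # 缓冲区：用于积累当前正在处理的行
--     # 初始化时，它会收集第一个 def 之前的所有内容（如 imports, 注释）
--     buffer_lines = []
--
--     # 当前正在记录的函数名
--     current_func_name = None
--
--     for line in lines:
--         # 检测是否是函数定义行
--         # 使用 startswith 保持和你原代码一致，也可以改为 re.match(r"^\s*def ") 以支持缩进
--         if line.startswith("def "):
--             new_func_name = line.split("def ")[1].split("(")[0]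
--
--             if current_func_name:
--                 # === 遇到新函数，且之前已经在记录旧函数 ===
--                 # 这说明上一个函数结束了，新函数开始了。
--                 # 难点：buffer_lines 的末尾可能包含属于新函数的注释（如 # [GEN_PLAN]）
--                 # 我们需要从后往前“回溯”，把这些注释切分给新函数
--
--                 split_idx = len(buffer_lines)
--                 # 倒序遍历缓冲区，找到代码和注释的分界线
--                 for i in range(len(buffer_lines) - 1, -1, -1):
--                     l_strip = buffer_lines[i].strip()
--                     # 如果是注释(#)、装饰器(@)或者是空行，通常属于下一个函数的头部
--                     if l_strip.startswith('#') or l_strip.startswith('@') or l_strip == "":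
--                         split_idx = i
--                     else:
--                         # 一旦遇到非注释的代码行（如 return x），停止回溯
--                         break
--
--                 # 执行切分
--                 prev_func_body = buffer_lines[:split_idx]  # 归属上一个函数
--                 next_func_prefix = buffer_lines[split_idx:]  # 归属新函数（作为前缀）
--
--                 # 保存上一个函数
--                 if prev_func_body:
--                     funcs.append([current_func_name, "\n".join(prev_func_body)])
--
--                 # 重置缓冲区：新函数前缀 + 当前 def 行
--                 buffer_lines = next_func_prefix + [line]
--                 current_func_name = new_func_name
--
--             else:
--                 # === 遇到第一个函数 ===
--                 # 此时 buffer_lines 里是 import 或第一个 Plan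
--                 # 直接将 def 行追加进去，它们整体属于第一个函数
--                 buffer_lines.append(line)
--                 current_func_name = new_func_name
--
--         else:
--             # === 非 def 行 ===
--             # 无论是代码还是注释，先暂时放入缓冲区
--             buffer_lines.append(line)
--
--     # 循环结束，保存最后一个函数
--     if current_func_name and buffer_lines:
--         funcs.append([current_func_name, "\n".join(buffer_lines)])
--
--     return funcs
-- ===== SOURCE B (Python) =====
-- def get_function(prompt):
--     # Two-phase re-implementation: (1) split lines into a preamble and one group
--     # per 'def ' line; (2) fold over the groups with a carry that moves each
--     # group's trailing comment/decorator/blank lines to the next group's front.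
--     lines = prompt.split('\n')
--     groups = []
--     cur = []
--     for l in lines:
--         if l.startswith("def "):
--             groups.append(cur)
--             cur = [l]
--         else:
--             cur.append(l)
--     groups.append(cur)
--     preamble = groups[0]
--     blocks = [(g[0].split("def ")[1].split("(")[0], g) for g in groups[1:]]
--     out = []
--     carry = preamble
--     for i in range(len(blocks)):
--         name, b = blocks[i]
--         m = carry + b
--         if i + 1 < len(blocks):
--             cut = len(m)
--             while cut > 0 and _is_header(m[cut - 1]):
--                 cut -= 1
--             out.append([name, "\n".join(m[:cut])])
--             carry = m[cut:]
--         else: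
--             out.append([name, "\n".join(m)])
--     return out
--
-- def _is_header(l):
--     s = l.strip()
--     return s.startswith('#') or s.startswith('@') or s == ""
-- ===== Notes on version B (the rewrite author's own statement) =====
-- stated objective: alternative
-- what changed: A is one stateful pass interleaving buffering, backward comment re-splitting and emission; B is a two-phase pipeline: first split the lines into a preamble plus one group per 'def ' line, then fold over the groups with a carry that moves each group's trailing comment/decorator/blank lines to the next block.
-- intended difference: On prompts containing a 'def ' line whose parsed name is empty (e.g. 'def ('), A's truthiness test 'if current_func_name:' silently drops that function's block or merges it into a neighbour, while B returns the block with its empty name, which is the intended uniform splitting. — e.g. on get_function("def ("): A returns [], B returns [["", "def ("]]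
import Mathlib
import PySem

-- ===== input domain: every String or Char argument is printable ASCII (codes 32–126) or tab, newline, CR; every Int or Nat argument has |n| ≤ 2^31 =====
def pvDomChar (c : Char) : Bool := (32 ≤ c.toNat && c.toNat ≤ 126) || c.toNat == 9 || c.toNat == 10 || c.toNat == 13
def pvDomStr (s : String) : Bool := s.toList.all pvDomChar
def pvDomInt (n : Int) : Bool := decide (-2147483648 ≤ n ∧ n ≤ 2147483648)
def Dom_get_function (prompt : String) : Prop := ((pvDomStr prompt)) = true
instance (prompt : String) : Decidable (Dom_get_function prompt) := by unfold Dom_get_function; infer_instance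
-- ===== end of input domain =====

-- B replaces A's single stateful pass (buffer + current name + backward re-split at each def) by a
-- two-phase pipeline: split the lines into a preamble plus one group per 'def ' line, then fold over
-- the groups with a carry moving each group's trailing comment/decorator/blank lines to the next block.

-- shared per-line helpers (B's Python reuses A's predicate and name-parsing expressions verbatim)
def pvIsDef (l : String) : Bool := PySem.Str.startswith l "def "

-- line.split("def ")[1].split("(")[0]; both programs evaluate it only on lines that start with
-- "def " (so index [1] exists) and split always returns a non-empty list (so [0] exists)
def pvNameOf (l : String) : String :=
  PySem.List.pyGetD
    ((PySem.Str.split? (PySem.List.pyGetD ((PySem.Str.split? l "def ").getD []) 1 "") "(").getD []) 0 ""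

-- l.strip() startswith('#') or startswith('@') or == ""
def pvIsHeader (l : String) : Bool :=
  let s := PySem.Str.strip l
  PySem.Str.startswith s "#" || PySem.Str.startswith s "@" || (s == "")

-- ===== PORT A =====
-- the descending index loop with break computes the maximal all-header suffix of the buffer,
-- i.e. split_idx = len(buffer) - len(takeWhile header (reverse buffer))
def pvALoop : List String → List (List String) → List String → Option String → List (List String)
  | [], funcs, buffer, cur =>
      if (cur.getD "" ≠ "") ∧ (buffer ≠ []) then
        funcs ++ [[cur.getD "", PySem.Str.join "\n" buffer]]
      else funcs
  | line :: rest, funcs, buffer, cur =>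
      if pvIsDef line then
        let newName := pvNameOf line
        if cur.getD "" ≠ "" then
          let splitIdx := buffer.length - (buffer.reverse.takeWhile pvIsHeader).length
          let prev := buffer.take splitIdx
          let nxt := buffer.drop splitIdx
          pvALoop rest
            (if prev ≠ [] then funcs ++ [[cur.getD "", PySem.Str.join "\n" prev]] else funcs)
            (nxt ++ [line]) (some newName)
        else
          pvALoop rest funcs (buffer ++ [line]) (some newName)
      else
        pvALoop rest funcs (buffer ++ [line]) cur

def get_function (prompt : String) : List (List String) :=
  pvALoop ((PySem.Str.split? prompt "\n").getD []) [] [] none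

-- ===== PORT B =====
-- phase 1 step: start a new group at each def line
def pvStepB (st : List (List String) × List String) (l : String) :
    List (List String) × List String :=
  if pvIsDef l then (st.1 ++ [st.2], [l]) else (st.1, st.2 ++ [l])

-- phase 2: fold over the named blocks with a carry of reassigned trailing header lines;
-- the backward while loop computes cut = len(m) - len(takeWhile header (reverse m))
def pvBLoop : List String → List (String × List String) → List (List String)
  | _, [] => []
  | carry, [(n, b)] => [[n, PySem.Str.join "\n" (carry ++ b)]]
  | carry, (n, b) :: rest =>
      let m := carry ++ b
      let cut := m.length - (m.reverse.takeWhile pvIsHeader).length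
      [[n, PySem.Str.join "\n" (m.take cut)]] ++ pvBLoop (m.drop cut) rest

def get_function_alt (prompt : String) : List (List String) :=
  let lines := (PySem.Str.split? prompt "\n").getD []
  let p := lines.foldl pvStepB ([], [])
  let groups := p.1 ++ [p.2]
  let blocks := (groups.drop 1).map (fun g => (pvNameOf (PySem.List.pyGetD g 0 ""), g))
  pvBLoop (groups.headD []) blocks

-- ===== PRECONDITION & SPEC =====
-- On prompts containing a 'def ' line whose parsed name is empty (e.g. "def ("), A's truthiness test
-- 'if current_func_name:' silently drops that function's block or merges it into a neighbour, while
-- B returns the block with its empty name — the intended uniform splitting.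
def D_get_function (prompt : String) : Prop :=
  (((PySem.Str.split? prompt "\n").getD []).any (fun l => pvIsDef l && (pvNameOf l == ""))) = true
instance (prompt : String) : Decidable (D_get_function prompt) := by
  unfold D_get_function; infer_instance

def Spec_get_function (prompt : String) (out : List (List String)) : Prop :=
  ¬ D_get_function prompt → out = get_function_alt prompt
instance (prompt : String) (out : List (List String)) : Decidable (Spec_get_function prompt out) := by
  unfold Spec_get_function; infer_instance

def pvDiffWitness_get_function : String := "def ("
def pvDiffWitnessOut_get_function : (List (List String)) × (List (List String)) :=
  ([], [["", "def ("]])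

-- ===== CLAIM (what is proved, stated in full; the proofs are below) =====
def Claim_unchanged_get_function : Prop :=
  ∀ (prompt : String), Dom_get_function prompt → Spec_get_function prompt (get_function prompt)
def Claim_changed_get_function : Prop :=
  Dom_get_function (pvDiffWitness_get_function) ∧ D_get_function (pvDiffWitness_get_function) ∧
  get_function (pvDiffWitness_get_function) = pvDiffWitnessOut_get_function.1 ∧
  get_function_alt (pvDiffWitness_get_function) = pvDiffWitnessOut_get_function.2 ∧
  pvDiffWitnessOut_get_function.1 ≠ pvDiffWitnessOut_get_function.2
def Claim_exact_get_function : Prop :=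
  ∀ (prompt : String), Dom_get_function prompt → D_get_function prompt →
    get_function prompt ≠ get_function_alt prompt

-- ===== LEMMAS AND PROOFS =====

-- the common grouping of a line list: (preamble, [(def line, following lines), …])
def pvGrp : List String → List String × List (String × List String)
  | [] => ([], [])
  | l :: ls =>
      let r := pvGrp ls
      if pvIsDef l then ([], (l, r.1) :: r.2) else (l :: r.1, r.2)

-- A's steady-state behaviour as a function of the grouping
def pvAsm : List String → String → List (String × List String) → List (List String)
  | cur, n, [] => if cur ≠ [] then [[n, PySem.Str.join "\n" cur]] else []
  | cur, n, (d, g) :: gs =>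
      let cut := cur.length - (cur.reverse.takeWhile pvIsHeader).length
      (if cur.take cut ≠ [] then [[n, PySem.Str.join "\n" (cur.take cut)]] else []) ++
        pvAsm (cur.drop cut ++ d :: g) (pvNameOf d) gs

def pvTail : List String → List (String × List String) → List (List String)
  | _, [] => []
  | pre, (d, g) :: gs => pvAsm (pre ++ d :: g) (pvNameOf d) gs

theorem pv_takeWhile_append_false {α : Type} (p : α → Bool) (xs : List α) (y : α) (ys : List α)
    (h : p y = false) : (xs ++ y :: ys).takeWhile p = xs.takeWhile p := by
  induction xs with
  | nil => simp [List.takeWhile, h]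
  | cons x xs ih => by_cases hx : p x <;> simp [hx, ih]

theorem pv_strip_cons (c : Char) (cs : List Char) (h : PySem.Chars.isspace c = false) :
    ∃ t, PySem.Chars.strip (c :: cs) = c :: t := by
  have hl : PySem.Chars.lstrip (c :: cs) = c :: cs := by
    simp [PySem.Chars.lstrip, h]
  simp only [PySem.Chars.strip, hl, PySem.Chars.rstrip, List.reverse_cons, List.dropWhile_append]
  by_cases he : (List.dropWhile PySem.Chars.isspace cs.reverse).isEmpty
  · simp [he, h]
  · simp [he]


theorem pv_hdr_of_def (l : String) (h : pvIsDef l = true) : pvIsHeader l = false := by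
  have hpre : "def ".toList <+: l.toList :=
    (PySem.Chars.startswith_iff l.toList "def ".toList).mp (by simpa [pvIsDef] using h)
  obtain ⟨rest, hrest⟩ := hpre
  have hstrip : ∃ t, PySem.Chars.strip l.toList = 'd' :: t := by
    rw [← hrest]; exact pv_strip_cons 'd' _ (by decide)
  obtain ⟨t, ht⟩ := hstrip
  have htl : (PySem.Str.strip l).toList = 'd' :: t := by
    simp [PySem.Str.toList_strip, ht]
  simp only [pvIsHeader, Bool.or_eq_false_iff]
  refine ⟨⟨?_, ?_⟩, ?_⟩
  · simp [PySem.Str.startswith_eq, htl, PySem.Chars.startswith, List.isPrefixOf]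
  · simp [PySem.Str.startswith_eq, htl, PySem.Chars.startswith, List.isPrefixOf]
  · have : PySem.Str.strip l ≠ "" := by
      intro hh; rw [hh] at htl; simp at htl
    simpa using this


theorem pv_grp_def (ls : List String) : ∀ p ∈ (pvGrp ls).2, pvIsDef p.1 = true := by
  induction ls with
  | nil => simp [pvGrp]
  | cons l ls ih =>
      by_cases hd : pvIsDef l
      · simp only [pvGrp, hd, if_pos]
        intro p hp
        rcases List.mem_cons.mp hp with rfl | hp
        · exact hd
        · exact ih p hp
      · simp only [pvGrp, hd]
        simpa using ih


theorem pv_grp_mem (ls : List String) (l : String) (hl : l ∈ ls) (hd : pvIsDef l = true) :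
    ∃ g, (l, g) ∈ (pvGrp ls).2 := by
  induction ls with
  | nil => cases hl
  | cons l' ls ih =>
      by_cases hd' : pvIsDef l'
      · rcases List.mem_cons.mp hl with rfl | hmem
        · exact ⟨(pvGrp ls).1, by simp [pvGrp, hd']⟩
        · obtain ⟨g, hg⟩ := ih hmem
          exact ⟨g, by simp only [pvGrp, hd', if_pos]; exact List.mem_cons_of_mem _ hg⟩
      · rcases List.mem_cons.mp hl with rfl | hmem
        · exact absurd hd hd'
        · obtain ⟨g, hg⟩ := ih hmem
          exact ⟨g, by simp only [pvGrp, hd']; simpa using hg⟩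


-- the maximal header suffix of c ++ d :: g stops at d
theorem pv_suffix_len (c : List String) (d : String) (g : List String)
    (hd : pvIsHeader d = false) :
    ((c ++ d :: g).reverse.takeWhile pvIsHeader).length ≤ g.length := by
  have hrev : (c ++ d :: g).reverse = g.reverse ++ d :: c.reverse := by simp
  rw [hrev, pv_takeWhile_append_false _ _ _ _ hd]
  simpa using (List.takeWhile_sublist (l := g.reverse) (p := pvIsHeader)).length_le


theorem pv_lemA1 (ls : List String) : ∀ (funcs : List (List String)) (buffer : List String)
    (n : String), n ≠ "" → (∀ l ∈ ls, pvIsDef l = true → pvNameOf l ≠ "") →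
    pvALoop ls funcs buffer (some n) = funcs ++ pvAsm (buffer ++ (pvGrp ls).1) n (pvGrp ls).2 := by
  induction ls with
  | nil =>
      intro funcs buffer n hn _
      by_cases hb : buffer = [] <;> simp [pvALoop, pvGrp, pvAsm, hn, hb]
  | cons line rest ih =>
      intro funcs buffer n hn hP
      have hPrest : ∀ l ∈ rest, pvIsDef l = true → pvNameOf l ≠ "" :=
        fun l hl => hP l (List.mem_cons_of_mem _ hl)
      by_cases hdl : pvIsDef line
      · simp only [pvALoop, hdl, if_pos, Option.getD_some, hn, ne_eq, not_false_iff]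
        rw [ih _ _ _ (hP line List.mem_cons_self hdl) hPrest]
        simp only [pvGrp, hdl, if_pos, pvAsm, List.append_nil]
        by_cases hprev : buffer.take (buffer.length - (buffer.reverse.takeWhile pvIsHeader).length) = []
        · simp [hprev, List.append_assoc]
        · simp [hprev, List.append_assoc]
      · simp only [pvALoop, hdl, Bool.false_eq_true, if_false]
        rw [ih _ _ _ hn hPrest]
        simp [pvGrp, hdl, List.append_assoc]


theorem pv_lemA0 (ls : List String) : ∀ (funcs : List (List String)) (buffer : List String),
    (∀ l ∈ ls, pvIsDef l = true → pvNameOf l ≠ "") →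
    pvALoop ls funcs buffer none = funcs ++ pvTail (buffer ++ (pvGrp ls).1) (pvGrp ls).2 := by
  induction ls with
  | nil => intro funcs buffer _; simp [pvALoop, pvGrp, pvTail]
  | cons line rest ih =>
      intro funcs buffer hP
      have hPrest : ∀ l ∈ rest, pvIsDef l = true → pvNameOf l ≠ "" :=
        fun l hl => hP l (List.mem_cons_of_mem _ hl)
      by_cases hdl : pvIsDef line
      · simp only [pvALoop, hdl, if_pos, Option.getD_none, ne_eq, not_true_eq_false, if_false]
        rw [pv_lemA1 rest _ _ _ (hP line List.mem_cons_self hdl) hPrest]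
        simp [pvGrp, hdl, pvTail, List.append_assoc]
      · simp only [pvALoop, hdl, Bool.false_eq_true, if_false]
        rw [ih _ _ hPrest]
        simp [pvGrp, hdl, List.append_assoc]


theorem pv_lemB2 (ls : List String) : ∀ (acc : List (List String)) (cur : List String),
    (ls.foldl pvStepB (acc, cur)).1 ++ [(ls.foldl pvStepB (acc, cur)).2] =
      acc ++ [cur ++ (pvGrp ls).1] ++ (pvGrp ls).2.map (fun p => p.1 :: p.2) := by
  induction ls with
  | nil => intro acc cur; simp [pvGrp]
  | cons l ls ih =>
      intro acc cur
      by_cases hd : pvIsDef l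
      · simp only [List.foldl_cons, pvStepB, hd, if_pos]
        rw [ih]
        simp [pvGrp, hd]
      · simp only [List.foldl_cons, pvStepB, hd, Bool.false_eq_true, if_false]
        rw [ih]
        simp [pvGrp, hd, List.append_assoc]


theorem pv_lemB3 (gs : List (String × List String)) : ∀ (c : List String) (d : String)
    (g : List String) (n : String), pvIsHeader d = false →
    (∀ p ∈ gs, pvIsHeader p.1 = false) →
    pvAsm (c ++ d :: g) n gs =
      pvBLoop c ((n, d :: g) :: gs.map (fun p => (pvNameOf p.1, p.1 :: p.2))) := by
  induction gs with
  | nil =>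
      intro c d g n hd _
      simp [pvAsm, pvBLoop]
  | cons q gs' ih =>
      intro c d g n hd hgs
      obtain ⟨d2, g2⟩ := q
      have hd2 : pvIsHeader d2 = false := hgs (d2, g2) List.mem_cons_self
      have hgs' : ∀ p ∈ gs', pvIsHeader p.1 = false :=
        fun p hp => hgs p (List.mem_cons_of_mem _ hp)
      have hk := pv_suffix_len c d g hd
      have hcut : 1 ≤ (c ++ d :: g).length - ((c ++ d :: g).reverse.takeWhile pvIsHeader).length := by
        simp only [List.length_append, List.length_cons]
        omega
      have hne : (c ++ d :: g).take
          ((c ++ d :: g).length - ((c ++ d :: g).reverse.takeWhile pvIsHeader).length) ≠ [] := by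
        rw [ne_eq, List.take_eq_nil_iff]
        push Not
        constructor
        · omega
        · simp
      simp only [pvAsm, List.map_cons, pvBLoop, hne, ne_eq, not_false_iff, if_pos, List.cons_append,
        List.nil_append]
      rw [ih _ _ _ _ hd2 hgs']


-- B's port rewritten through the grouping
theorem pv_altChar (prompt : String) :
    get_function_alt prompt =
      pvBLoop (pvGrp ((PySem.Str.split? prompt "\n").getD [])).1
        ((pvGrp ((PySem.Str.split? prompt "\n").getD [])).2.map
          (fun p => (pvNameOf p.1, p.1 :: p.2))) := by
  simp only [get_function_alt]
  rw [pv_lemB2]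
  simp [List.map_map, Function.comp_def, PySem.List.pyGetD_zero_cons]


theorem pv_lemTA (ls : List String) : ∀ (funcs : List (List String)) (buffer : List String)
    (cur : Option String), (∀ f ∈ funcs, f.head? ≠ some "") →
    ∀ f ∈ pvALoop ls funcs buffer cur, f.head? ≠ some "" := by
  induction ls with
  | nil =>
      intro funcs buffer cur hfu f hf
      simp only [pvALoop] at hf
      split at hf
      · rename_i hc
        rcases List.mem_append.mp hf with h | h
        · exact hfu f h
        · simp only [List.mem_singleton] at h
          subst h
          simpa using hc.1
      · exact hfu f hf
  | cons line rest ih =>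
      intro funcs buffer cur hfu f hf
      simp only [pvALoop] at hf
      split at hf
      · split at hf
        · rename_i hc
          refine ih _ _ _ ?_ f hf
          intro f' hf'
          split at hf'
          · rcases List.mem_append.mp hf' with h | h
            · exact hfu f' h
            · simp only [List.mem_singleton] at h
              subst h
              simpa using hc
          · exact hfu f' hf'
        · exact ih _ _ _ hfu f hf
      · exact ih _ _ _ hfu f hf


theorem pv_lemTB : ∀ (bs : List (String × List String)) (carry : List String),
    (pvBLoop carry bs).map List.head? = bs.map (fun p => some p.1)
  | [], carry => by simp [pvBLoop]
  | [(n, b)], carry => by simp [pvBLoop]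
  | (n, b) :: x :: rest, carry => by
      simp only [pvBLoop, List.map_append, List.map]
      simp [pv_lemTB (x :: rest)]


-- ===== VERDICT (by name: the statement is the Claim_ definition above) =====
theorem get_function_spec : Claim_unchanged_get_function := by
  intro prompt _ hD
  have hP : ∀ l ∈ (PySem.Str.split? prompt "\n").getD [], pvIsDef l = true → pvNameOf l ≠ "" := by
    intro l hl hdl hname
    exact hD (List.any_eq_true.mpr ⟨l, hl, by simp [hdl, hname]⟩)
  show get_function prompt = get_function_alt prompt
  rw [pv_altChar]
  unfold get_function
  rw [pv_lemA0 _ [] [] hP]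
  simp only [List.nil_append]
  rcases h : (pvGrp ((PySem.Str.split? prompt "\n").getD [])).2 with _ | ⟨⟨d, g⟩, gs⟩
  · simp [pvTail, pvBLoop]
  · have hdd : pvIsDef d = true := pv_grp_def _ (d, g) (h ▸ List.mem_cons_self)
    have hgs : ∀ p ∈ gs, pvIsHeader p.1 = false := by
      intro p hp
      exact pv_hdr_of_def _ (pv_grp_def _ p (h ▸ List.mem_cons_of_mem _ hp))
    simp only [pvTail, List.map_cons]
    exact pv_lemB3 gs _ d g (pvNameOf d) (pv_hdr_of_def d hdd) hgs


theorem get_function_changed : Claim_changed_get_function := by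
  unfold Claim_changed_get_function; decide

theorem get_function_tight : Claim_exact_get_function := by
  intro prompt _ hD hEq
  obtain ⟨l, hl, hprop⟩ := List.any_eq_true.mp hD
  have hsplit : pvIsDef l = true ∧ pvNameOf l = "" := by simpa using hprop
  obtain ⟨hdl, hname⟩ := hsplit
  obtain ⟨g, hg⟩ := pv_grp_mem _ l hl hdl
  have hmem : some "" ∈ (get_function_alt prompt).map List.head? := by
    rw [pv_altChar, pv_lemTB, List.map_map]
    refine List.mem_map.mpr ⟨(l, g), hg, ?_⟩
    simp [hname]
  obtain ⟨f, hf, hfh⟩ := List.mem_map.mp hmem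
  rw [← hEq] at hf
  exact pv_lemTA _ [] [] none (by simp) f hf hfh
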